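-- pv_equiv track=rewrite | github.com/hasii2011/pyut | src/org/pyut/plugins/io/IoJavaReverse.py | isClassBeginning
-- ===== SOURCE A (Python) =====
-- CLASS_MODIFIER   = ["public", "protected", "private", "abstract", "final", "static", "strictfp"]
--
-- def isClassBeginning(lstFile, currentPos):
--     """
--     Return True if the specified line is a class beginning
--
--     @param lstFile : list of instructions read from the file to analyze
--     @param currentPos : current position in the list
--     @return bool : True if the specified line do begin a class
--     @author C.Dutoit
--     @since 1.0
--     """
--     lstUsedCM = []      # List of used class modifiers
--     # Evaluate each argument
--     pos = currentPos
--     while pos < len(lstFile):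
--         el = lstFile[pos]
--         # Is current argument a class modifier ?
--         if el in CLASS_MODIFIER:
--             # if not modified, add it as modifiers list
--             if not (el in lstUsedCM):
--                 lstUsedCM.append(el)
--             else:  # Already used => not a valid class beginning
--                 # TODO : print warning ?
--                 return False
--         elif el == "class":  # class token => this is a class
--             return True
--         elif el == "interface":  # interface token => take it as a class
--             return True
--         else:  # unacceptable token => not a class beginning
--             return False
--         pos += 1
--     return False
-- ===== SOURCE B (Python) =====
-- CLASS_MODIFIER   = ["public", "protected", "private", "abstract", "final", "static", "strictfp"]
-- MOD_INDEX = {m: i for i, m in enumerate(CLASS_MODIFIER)}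
--
-- def isClassBeginning(lstFile, currentPos):
--     # Recursive descent with a direct-address table: one boolean slot per modifier,
--     # addressed through the MOD_INDEX hash, so no list scans remain; the acceptance
--     # test (class/interface) comes first and also classifies non-modifier tokens.
--     def go(pos, seen):
--         if pos >= len(lstFile):
--             return False
--         tok = lstFile[pos]
--         if tok == "class" or tok == "interface":
--             return True
--         i = MOD_INDEX.get(tok)
--         if i is None or seen[i]:
--             return False
--         seen[i] = True
--         return go(pos + 1, seen)
--     return go(currentPos, [False] * len(CLASS_MODIFIER))
-- ===== Notes on version B (the rewrite author's own statement) =====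
-- stated objective: alternative
-- what changed: B replaces A's iterative scan with list-membership tests (modifier list scan + growing used-list scan) by a recursive descent over a direct-address boolean table indexed through a precomputed token->slot hash, so both inner list scans disappear and the accept test comes first.
import Mathlib
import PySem

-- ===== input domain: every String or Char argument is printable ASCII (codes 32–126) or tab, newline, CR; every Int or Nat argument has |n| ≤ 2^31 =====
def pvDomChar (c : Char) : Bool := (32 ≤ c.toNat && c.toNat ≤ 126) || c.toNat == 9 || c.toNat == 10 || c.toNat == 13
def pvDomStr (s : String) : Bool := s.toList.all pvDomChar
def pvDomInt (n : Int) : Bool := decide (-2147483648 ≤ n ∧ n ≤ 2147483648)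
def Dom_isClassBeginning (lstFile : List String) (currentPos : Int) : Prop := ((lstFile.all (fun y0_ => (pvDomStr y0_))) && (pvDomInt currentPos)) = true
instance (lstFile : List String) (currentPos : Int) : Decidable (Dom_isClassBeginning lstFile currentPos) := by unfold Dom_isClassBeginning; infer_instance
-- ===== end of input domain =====

-- B replaces A's iterative scan with list-membership duplicate tracking by a recursive
-- descent over a hash-indexed direct-address boolean table (one slot per modifier).

-- ===== PORT A =====
def pvClassModifier : List String := ["public", "protected", "private", "abstract", "final", "static", "strictfp"]

-- A's while loop: fuel = number of remaining positions (len - pos); pyGet? = lstFile[pos]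
def pvALoop (lstFile : List String) (fuel : Nat) (pos : Int) (lstUsedCM : List String) : Bool :=
  match fuel with
  | 0 => false
  | fuel + 1 =>
    match PySem.List.pyGet? lstFile pos with
    | none => false   -- IndexError (negative pos below -len); excluded by Pre_
    | some el =>
      if el ∈ pvClassModifier then
        if el ∈ lstUsedCM then false
        else pvALoop lstFile fuel (pos + 1) (lstUsedCM ++ [el])
      else if el == "class" then true
      else if el == "interface" then true
      else false

def isClassBeginning (lstFile : List String) (currentPos : Int) : Bool :=
  pvALoop lstFile ((lstFile.length - currentPos).toNat) currentPos []

-- ===== PORT B =====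
-- MOD_INDEX = {m: i for i, m in enumerate(CLASS_MODIFIER)}, written out as the literal dict it builds
def pvModIndex : PySem.Dict String Int :=
  PySem.Dict.ofList [("public", 0), ("protected", 1), ("private", 2), ("abstract", 3),
                     ("final", 4), ("static", 5), ("strictfp", 6)]

-- B's recursion go(pos, seen); fuel = len - pos bounds the recursion depth.
-- seen[i] read: pyGet? (i is always a dict value 0..6, in range); seen[i] = True: List.set (exact for 0 ≤ i < len).
def pvBGo (lstFile : List String) (fuel : Nat) (pos : Int) (seen : List Bool) : Bool :=
  match fuel with
  | 0 => false
  | fuel + 1 =>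
    if (lstFile.length : Int) ≤ pos then false
    else
      match PySem.List.pyGet? lstFile pos with
      | none => false   -- IndexError (negative pos below -len); excluded by Pre_
      | some tok =>
        if tok == "class" || tok == "interface" then true
        else
          match PySem.Dict.get? pvModIndex tok with
          | none => false
          | some i =>
            if (PySem.List.pyGet? seen i).getD false then false
            else pvBGo lstFile fuel (pos + 1) (seen.set i.toNat true)

def isClassBeginning_alt (lstFile : List String) (currentPos : Int) : Bool :=
  pvBGo lstFile ((lstFile.length - currentPos).toNat) currentPos (List.replicate 7 false)

-- ===== PRECONDITION & SPEC =====
-- Pre_ excludes exactly the inputs where both Pythons raise IndexError: a currentPos below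
-- -len(lstFile) that still enters the loop (negative indexing past the front).
def Pre_isClassBeginning (lstFile : List String) (currentPos : Int) : Prop :=
  -(lstFile.length : Int) ≤ currentPos ∨ (lstFile.length : Int) ≤ currentPos
instance (lstFile : List String) (currentPos : Int) : Decidable (Pre_isClassBeginning lstFile currentPos) := by unfold Pre_isClassBeginning; infer_instance

def pvWitness_isClassBeginning : List String × Int := (["public", "class"], 0)

def Spec_isClassBeginning (lstFile : List String) (currentPos : Int) (out : Bool) : Prop := out = isClassBeginning_alt lstFile currentPos
instance (lstFile : List String) (currentPos : Int) (out : Bool) : Decidable (Spec_isClassBeginning lstFile currentPos out) := by unfold Spec_isClassBeginning; infer_instance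

-- ===== CLAIM (what is proved, stated in full; the proofs are below) =====
def Claim_equal_isClassBeginning : Prop := ∀ (lstFile : List String) (currentPos : Int), Dom_isClassBeginning lstFile currentPos → Pre_isClassBeginning lstFile currentPos → Spec_isClassBeginning lstFile currentPos (isClassBeginning lstFile currentPos)

-- ===== LEMMAS AND PROOFS =====

-- the abstraction between the two loop states: B's table is the membership image of A's used-list
def pvTable (used : List String) : List Bool := pvClassModifier.map (fun m => decide (m ∈ used))

theorem pvTable_nil : pvTable [] = List.replicate 7 false := by
  simp [pvTable, pvClassModifier]

-- dict lookup of a non-modifier token misses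
theorem pvModIndex_none (tok : String) (h : tok ∉ pvClassModifier) :
    PySem.Dict.get? pvModIndex tok = none := by
  simp [pvClassModifier, List.mem_cons, not_or] at h
  obtain ⟨h1, h2, h3, h4, h5, h6, h7⟩ := h
  have hmk : pvModIndex = PySem.Dict.mk [("public", 0), ("protected", 1), ("private", 2),
      ("abstract", 3), ("final", 4), ("static", 5), ("strictfp", 6)] := by decide
  simp [hmk, PySem.Dict.get?,
        Ne.symm h1, Ne.symm h2, Ne.symm h3, Ne.symm h4, Ne.symm h5, Ne.symm h6, Ne.symm h7]

-- for a modifier token: it is not class/interface, the dict gives its slot, the slot reads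
-- its used-membership, and setting the slot is appending it to used
theorem pvModIndex_facts (used : List String) (tok : String) (h : tok ∈ pvClassModifier) :
    (tok == "class" || tok == "interface") = false ∧
    ∃ j : Int, PySem.Dict.get? pvModIndex tok = some j ∧
      (PySem.List.pyGet? (pvTable used) j).getD false = decide (tok ∈ used) ∧
      (pvTable used).set j.toNat true = pvTable (used ++ [tok]) := by
  simp only [pvClassModifier, List.mem_cons, List.not_mem_nil, or_false] at h
  rcases h with h | h | h | h | h | h | h <;> subst h
  · exact ⟨by decide, 0, by decide, by simp [pvTable, pvClassModifier, PySem.List.pyGet?, PySem.List.pyIdx?],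
      by simp [pvTable, pvClassModifier, List.mem_append]⟩
  · exact ⟨by decide, 1, by decide, by simp [pvTable, pvClassModifier, PySem.List.pyGet?, PySem.List.pyIdx?],
      by simp [pvTable, pvClassModifier, List.mem_append]⟩
  · exact ⟨by decide, 2, by decide, by simp [pvTable, pvClassModifier, PySem.List.pyGet?, PySem.List.pyIdx?],
      by simp [pvTable, pvClassModifier, List.mem_append]⟩
  · exact ⟨by decide, 3, by decide, by simp [pvTable, pvClassModifier, PySem.List.pyGet?, PySem.List.pyIdx?],
      by simp [pvTable, pvClassModifier, List.mem_append]⟩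
  · exact ⟨by decide, 4, by decide, by simp [pvTable, pvClassModifier, PySem.List.pyGet?, PySem.List.pyIdx?],
      by simp [pvTable, pvClassModifier, List.mem_append]⟩
  · exact ⟨by decide, 5, by decide, by simp [pvTable, pvClassModifier, PySem.List.pyGet?, PySem.List.pyIdx?],
      by simp [pvTable, pvClassModifier, List.mem_append]⟩
  · exact ⟨by decide, 6, by decide, by simp [pvTable, pvClassModifier, PySem.List.pyGet?, PySem.List.pyIdx?],
      by simp [pvTable, pvClassModifier, List.mem_append]⟩

-- main invariant: A's loop on 'used' equals B's recursion on the membership table of 'used'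
theorem pvMain (lstFile : List String) (fuel : Nat) :
    ∀ (pos : Int) (used : List String),
      pvALoop lstFile fuel pos used = pvBGo lstFile fuel pos (pvTable used) := by
  induction fuel with
  | zero => intro pos used; simp [pvALoop, pvBGo]
  | succ n ih =>
    intro pos used
    simp only [pvALoop, pvBGo]
    cases h : PySem.List.pyGet? lstFile pos with
    | none => simp
    | some tok =>
      have hlt : ¬ ((lstFile.length : Int) ≤ pos) := by
        intro hle
        have : PySem.List.pyGet? lstFile pos = none := by
          rw [PySem.List.pyGet?_eq_none_iff]
          simp only [PySem.Raise.InRange]; omega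
        simp [this] at h
      rw [if_neg hlt]
      dsimp only
      by_cases hm : tok ∈ pvClassModifier
      · obtain ⟨hci, j, hj, hget, hset⟩ := pvModIndex_facts used tok hm
        simp only [hci, Bool.false_eq_true, if_false, hj, hget]
        by_cases hu : tok ∈ used
        · simp [hm, hu]
        · simp [hm, hu, hset, ih]
      · rw [pvModIndex_none tok hm]
        by_cases h1 : tok == "class"
        · simp [hm, h1]
        · by_cases h2 : tok == "interface" <;> simp [hm, h1, h2]

-- ===== VERDICT (by name: the statement is the Claim_ definition above) =====
theorem isClassBeginning_spec : Claim_equal_isClassBeginning := by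
  intro lstFile currentPos _ _
  unfold Spec_isClassBeginning isClassBeginning isClassBeginning_alt
  rw [← pvTable_nil, pvMain]
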